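-- pv_equiv track=rewrite | github.com/dennisjlee/adventofcode | aoc2021/day10.py | get_incomplete_score
-- ===== SOURCE A (Python) =====
-- from collections import deque
--
-- MATCHING_OPEN_CHARS = {
--     ')': '(',
--     ']': '[',
--     '}': '{',
--     '>': '<'
-- }
--
-- OPEN_CHARS = set(MATCHING_OPEN_CHARS.values())
--
-- CLOSE_CHARS = set(MATCHING_OPEN_CHARS.keys())
--
-- INCOMPLETE_POINTS = {
--     '(': 1,
--     '[': 2,
--     '{': 3,
--     '<': 4
-- }
--
-- def get_incomplete_score(line):
--     stack = deque()
--     for i, c in enumerate(line):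
--         if c in OPEN_CHARS:
--             stack.append(c)
--         elif c in CLOSE_CHARS:
--             top = stack.pop()
--             assert MATCHING_OPEN_CHARS[c] == top
--
--     score = 0
--     while stack:
--         top = stack.pop()
--         score = score * 5 + INCOMPLETE_POINTS[top]
--
--     return score
-- ===== SOURCE B (Python) =====
-- MATCHING_OPEN_CHARS = {
--     ')': '(',
--     ']': '[',
--     '}': '{',
--     '>': '<'
-- }
--
-- INCOMPLETE_POINTS = {
--     '(': 1,
--     '[': 2,
--     '{': 3,
--     '<': 4
-- }
--
-- def get_incomplete_score(line):
--     # No stack: keep the stack's autocomplete score itself as a base-5 number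
--     # (bottom = least significant digit) together with pow5 = 5**depth.
--     score = 0
--     pow5 = 1
--     for c in line:
--         if c in INCOMPLETE_POINTS:
--             score += INCOMPLETE_POINTS[c] * pow5
--             pow5 *= 5
--         elif c in MATCHING_OPEN_CHARS:
--             assert pow5 > 1
--             pow5 //= 5
--             top = score // pow5
--             assert top == INCOMPLETE_POINTS[MATCHING_OPEN_CHARS[c]]
--             score -= top * pow5
--     return score
-- ===== Notes on version B (the rewrite author's own statement) =====
-- stated objective: alternative
-- what changed: B removes the stack entirely: it keeps only the autocomplete score itself as a base-5 integer (bottom of stack = least-significant digit) plus pow5 = 5**depth, pushing and popping by integer arithmetic, so the final while-loop reduction of A disappears.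
import Mathlib
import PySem

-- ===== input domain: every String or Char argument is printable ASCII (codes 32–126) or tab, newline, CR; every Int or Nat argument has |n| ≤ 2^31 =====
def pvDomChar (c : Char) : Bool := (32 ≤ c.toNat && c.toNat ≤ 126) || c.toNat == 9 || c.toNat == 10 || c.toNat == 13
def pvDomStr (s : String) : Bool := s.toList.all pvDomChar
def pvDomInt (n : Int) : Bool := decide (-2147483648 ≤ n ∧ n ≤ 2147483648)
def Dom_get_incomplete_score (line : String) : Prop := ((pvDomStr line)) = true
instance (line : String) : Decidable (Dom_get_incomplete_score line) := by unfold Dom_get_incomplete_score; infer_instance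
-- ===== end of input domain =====

-- B replaces A's stack + final Horner pop-loop by two integers (score as a base-5
-- number, pow5 = 5^depth); same return value wherever A returns (alternative, not faster).

-- shared constant tables (OPEN_CHARS / CLOSE_CHARS / MATCHING_OPEN_CHARS / INCOMPLETE_POINTS)
def pvIsOpen (c : Char) : Bool := c == '(' || c == '[' || c == '{' || c == '<'
def pvIsClose (c : Char) : Bool := c == ')' || c == ']' || c == '}' || c == '>'
def pvMatch (c : Char) : Char :=
  if c == ')' then '(' else if c == ']' then '[' else if c == '}' then '{' else '<'
def pvPts (c : Char) : Int :=
  if c == '(' then 1 else if c == '[' then 2 else if c == '{' then 3 else 4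

-- ===== PORT A =====
-- the deque is a List Char with head = top of stack (append = cons, pop = head);
-- none = the loop raises (IndexError on popping the empty deque / AssertionError on mismatch)
def pvALoop : List Char → List Char → Option (List Char)
  | [], st => some st
  | c :: rest, st =>
    if pvIsOpen c then pvALoop rest (c :: st)
    else if pvIsClose c then
      match st with
      | [] => none
      | top :: st' => if pvMatch c == top then pvALoop rest st' else none
    else pvALoop rest st

-- the final 'while stack: score = score * 5 + INCOMPLETE_POINTS[stack.pop()]' loop
def pvAScore : List Char → Int → Int
  | [], score => score
  | top :: rest, score => pvAScore rest (score * 5 + pvPts top)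

def get_incomplete_score (line : String) : Int :=
  match pvALoop line.toList [] with
  | some st => pvAScore st 0
  | none => 0   -- Python raises here; such lines are outside Pre_

-- ===== PORT B =====
-- state = some (score, pow5); none = one of Source B's asserts failed (outside Pre_)
def pvBStep : Option (Int × Int) → Char → Option (Int × Int)
  | none, _ => none
  | some (score, pow5), c =>
    if pvIsOpen c then some (score + pvPts c * pow5, pow5 * 5)
    else if pvIsClose c then
      if pow5 > 1 then
        let pow5' := PySem.Int.floordiv pow5 5
        let top := PySem.Int.floordiv score pow5'
        if top == pvPts (pvMatch c) then some (score - top * pow5', pow5') else none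
      else none
    else some (score, pow5)

def get_incomplete_score_alt (line : String) : Int :=
  match line.toList.foldl pvBStep (some (0, 1)) with
  | some (score, _) => score
  | none => 0   -- unreachable under Pre_

-- ===== PRECONDITION & SPEC =====
-- Pre_: every closing bracket closes a matching, still-open bracket — the standard
-- "well-matched prefix" predicate on strings. Bracket matchedness has no quantifier-free
-- characterisation, so it is stated as the usual recursive predicate over the pending
-- openers; it decides membership only and computes no score. Exactly the lines on which
-- Python A returns instead of raising IndexError / AssertionError.
def pvValid : List Char → List Char → Bool
  | [], _ => true
  | c :: rest, st =>
    if pvIsOpen c then pvValid rest (c :: st)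
    else if pvIsClose c then
      match st with
      | [] => false
      | top :: st' => pvMatch c == top && pvValid rest st'
    else pvValid rest st

def Pre_get_incomplete_score (line : String) : Prop := pvValid line.toList [] = true
instance (line : String) : Decidable (Pre_get_incomplete_score line) := by
  unfold Pre_get_incomplete_score; infer_instance

def pvWitness_get_incomplete_score : String := "{<[()]>x[({<"

def Spec_get_incomplete_score (line : String) (out : Int) : Prop := out = get_incomplete_score_alt line
instance (line : String) (out : Int) : Decidable (Spec_get_incomplete_score line out) := by unfold Spec_get_incomplete_score; infer_instance

-- ===== CLAIM (what is proved, stated in full; the proofs are below) =====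
def Claim_equal_get_incomplete_score : Prop := ∀ (line : String), Dom_get_incomplete_score line → Pre_get_incomplete_score line → Spec_get_incomplete_score line (get_incomplete_score line)

-- ===== LEMMAS AND PROOFS =====

-- the stack's score, as A's final Horner loop computes it: top = most significant digit
def pvVal : List Char → Int
  | [] => 0
  | top :: rest => pvPts top * 5 ^ rest.length + pvVal rest

lemma pvPts_bounds (c : Char) : 1 ≤ pvPts c ∧ pvPts c ≤ 4 := by
  unfold pvPts; split_ifs <;> norm_num

lemma pvVal_bounds (st : List Char) : 0 ≤ pvVal st ∧ pvVal st < 5 ^ st.length := by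
  induction st with
  | nil => simp [pvVal]
  | cons t r ih =>
    have h := pvPts_bounds t
    simp only [pvVal, List.length_cons, pow_succ]
    have hp : (0:Int) < 5 ^ r.length := by positivity
    constructor <;> nlinarith [ih.1, ih.2]

lemma pvAScore_eq (st : List Char) (acc : Int) :
    pvAScore st acc = acc * 5 ^ st.length + pvVal st := by
  induction st generalizing acc with
  | nil => simp [pvAScore, pvVal]
  | cons t r ih =>
    simp only [pvAScore, pvVal, List.length_cons, ih, pow_succ]
    ring

lemma pvKey (cs : List Char) (st : List Char) (h : pvValid cs st = true) :
    ∃ st', pvALoop cs st = some st' ∧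
      List.foldl pvBStep (some (pvVal st, 5 ^ st.length)) cs
        = some (pvVal st', 5 ^ st'.length) := by
  induction cs generalizing st with
  | nil => exact ⟨st, rfl, rfl⟩
  | cons c rest ih =>
    simp only [pvValid] at h
    by_cases ho : pvIsOpen c
    · simp only [ho, if_true] at h
      obtain ⟨st', h1, h2⟩ := ih _ h
      refine ⟨st', by simp [pvALoop, ho, h1], ?_⟩
      have : pvBStep (some (pvVal st, 5 ^ st.length)) c
          = some (pvVal (c :: st), 5 ^ (c :: st).length) := by
        simp [pvBStep, ho, pvVal, pow_succ]; ring_nf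
      simpa [List.foldl, this] using h2
    · by_cases hc : pvIsClose c
      · simp only [ho, hc, if_true] at h
        cases st with
        | nil => simp at h
        | cons top st' =>
          cases hmb : (pvMatch c == top) with
          | false => simp [hmb] at h
          | true =>
          have hm : pvMatch c = top := by simpa using hmb
          have hv : pvValid rest st' = true := by simpa [hmb] using h
          obtain ⟨stf, h1, h2⟩ := ih _ hv
          refine ⟨stf, by simp [pvALoop, ho, hc, hm, h1], ?_⟩
          have hlen : (top :: st').length = st'.length + 1 := rfl
          have hpow : (1:Int) < 5 ^ (top :: st').length := by
            rw [hlen]; exact one_lt_pow₀ (by norm_num) (by omega)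
          have hp5 : (0:Int) < 5 ^ st'.length := by positivity
          have hfd1 : PySem.Int.floordiv ((5:Int) ^ (top :: st').length) 5
              = 5 ^ st'.length := by
            rw [PySem.Int.floordiv_eq_ediv_of_pos (by norm_num), hlen, pow_succ]
            exact Int.mul_ediv_cancel _ (by norm_num)
          have hb := pvVal_bounds st'
          have hval : pvVal (top :: st') = pvPts top * 5 ^ st'.length + pvVal st' := rfl
          have hfd2 : PySem.Int.floordiv (pvVal (top :: st')) (5 ^ st'.length)
              = pvPts top := by
            rw [PySem.Int.floordiv_eq_ediv_of_pos hp5, hval]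
            rw [add_comm, Int.add_mul_ediv_right _ _ (by positivity)]
            rw [Int.ediv_eq_zero_of_lt hb.1 hb.2]; ring
          have hstep : pvBStep (some (pvVal (top :: st'), 5 ^ (top :: st').length)) c
              = some (pvVal st', 5 ^ st'.length) := by
            simp only [pvBStep, ho, hc, hpow, hfd1, hfd2, hm, if_true,
              beq_self_eq_true, Bool.false_eq_true, if_false, Option.some.injEq,
              Prod.mk.injEq]
            exact ⟨by rw [hval]; ring, trivial⟩
          rw [List.foldl_cons, hstep]
          exact h2
      · simp only [ho, hc] at h
        obtain ⟨st', h1, h2⟩ := ih _ h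
        refine ⟨st', by simp [pvALoop, ho, hc, h1], ?_⟩
        simpa [List.foldl, pvBStep, ho, hc] using h2

-- ===== VERDICT (by name: the statement is the Claim_ definition above) =====
theorem get_incomplete_score_spec : Claim_equal_get_incomplete_score := by
  intro line _ hpre
  unfold Spec_get_incomplete_score
  obtain ⟨st', h1, h2⟩ := pvKey line.toList [] hpre
  unfold get_incomplete_score get_incomplete_score_alt
  have : pvVal ([] : List Char) = 0 := rfl
  simp only [this, List.length_nil, pow_zero] at h2
  rw [h1, h2]
  show pvAScore st' 0 = pvVal st'
  rw [pvAScore_eq]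
  ring
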